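-- pv_equiv track=rewrite | github.com/nikett/deep_qa | deep_qa/data/instances/text_classification/frame_embedded_label_instance.py | dense_frame_from
-- ===== SOURCE A (Python) =====
-- from typing import Dict, List
--
-- SLOTNAMES_ORDERED = ["agent", "beneficiary", "causer", "context", "definition", "event",
--                      "finalloc", "headverb", "initloc", "input", "output", "manner",
--                      "patient", "resultant", "timebegin", "timeend", "temporal", "hierarchical",
--                      "similar", "contemporary", "enables", "mechanism", "condition", "purpose",
--                      "cause", "openrel", "participant"]
--
-- UNKNOWN_SLOTVAL = "missingval"  # making an open world assumption, we do not observe all the values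
--
-- QUES_SLOTVAL = "ques"  # this slot in the frame must be queried/completed.
--
-- def dense_frame_from(sparse_frame: Dict[str, str],
--                      query_slotname: str):
--     """
--     Performs two types of padding:
--     i) unobserved slots are filled with self.unknown_slotval
--     ii) query slot is masked with self.unknown_queryval
--     The order of slots strictly follows from SLOTNAMES_ORDERED.
--     :param sparse_frame:
--             slotnames -> slot phrase [event -> plant absorb water , participant -> water]
--     :param query_slotname:
--             participant
--     :return: [plant absorb water, ques, missingval, missingval, ...]
--     """
--     slots = []
--     for slot_name in SLOTNAMES_ORDERED:
--         if slot_name == query_slotname:  # query hence masked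
--             slots.append(QUES_SLOTVAL)
--         elif slot_name in sparse_frame:  # observed hence as-is
--             slots.append(sparse_frame[slot_name])
--         else:  # unobserved hence inserted
--             slots.append(UNKNOWN_SLOTVAL)
--     return slots
-- ===== SOURCE B (Python) =====
-- SLOTNAMES_ORDERED = ["agent", "beneficiary", "causer", "context", "definition", "event",
--                      "finalloc", "headverb", "initloc", "input", "output", "manner",
--                      "patient", "resultant", "timebegin", "timeend", "temporal", "hierarchical",
--                      "similar", "contemporary", "enables", "mechanism", "condition", "purpose",
--                      "cause", "openrel", "participant"]
--
-- UNKNOWN_SLOTVAL = "missingval"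
--
-- QUES_SLOTVAL = "ques"
--
--
-- def dense_frame_from(sparse_frame, query_slotname):
--     index = {name: i for i, name in enumerate(SLOTNAMES_ORDERED)}
--     slots = [UNKNOWN_SLOTVAL] * len(SLOTNAMES_ORDERED)
--     for name, value in sparse_frame.items():
--         i = index.get(name)
--         if i is not None:
--             slots[i] = value
--     qi = index.get(query_slotname)
--     if qi is not None:
--         slots[qi] = QUES_SLOTVAL
--     return slots
-- ===== Notes on version B (the rewrite author's own statement) =====
-- stated objective: alternative
-- what changed: Instead of looping over the 27 slot names with a per-slot membership test and dict lookup, B pre-fills a length-27 list with UNKNOWN_SLOTVAL, scatters the sparse items into their positions via a name->index map, and overwrites the query position last.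
import Mathlib
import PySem

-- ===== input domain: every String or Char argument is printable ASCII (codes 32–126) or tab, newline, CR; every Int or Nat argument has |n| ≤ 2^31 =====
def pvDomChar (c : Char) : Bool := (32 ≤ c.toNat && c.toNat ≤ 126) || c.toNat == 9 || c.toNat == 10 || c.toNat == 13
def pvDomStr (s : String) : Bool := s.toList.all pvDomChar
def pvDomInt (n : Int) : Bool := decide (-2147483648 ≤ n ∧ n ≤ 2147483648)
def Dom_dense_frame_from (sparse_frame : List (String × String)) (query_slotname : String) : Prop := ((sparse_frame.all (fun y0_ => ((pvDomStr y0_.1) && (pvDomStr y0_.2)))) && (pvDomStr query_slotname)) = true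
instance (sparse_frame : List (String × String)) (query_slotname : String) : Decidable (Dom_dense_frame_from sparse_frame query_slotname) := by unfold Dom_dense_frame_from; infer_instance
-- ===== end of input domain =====

-- B replaces A's per-slot membership-test loop over the 27 slot names by a pre-filled
-- dense list into which the sparse items are scattered via a name->index map, with the
-- query position overwritten last (objective: alternative decomposition, same cost).


def SLOTNAMES_ORDERED : List String :=
  ["agent", "beneficiary", "causer", "context", "definition", "event",
   "finalloc", "headverb", "initloc", "input", "output", "manner",
   "patient", "resultant", "timebegin", "timeend", "temporal", "hierarchical",
   "similar", "contemporary", "enables", "mechanism", "condition", "purpose",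
   "cause", "openrel", "participant"]

def UNKNOWN_SLOTVAL : String := "missingval"

def QUES_SLOTVAL : String := "ques"

-- ===== PORT A =====
-- loop over SLOTNAMES_ORDERED, appending per-slot: query mask / observed value / unknown
def dense_frame_from (sparse_frame : List (String × String)) (query_slotname : String) : List String :=
  SLOTNAMES_ORDERED.foldl (fun slots slot_name =>
    if slot_name == query_slotname then slots ++ [QUES_SLOTVAL]
    else match List.lookup slot_name sparse_frame with  -- 'slot_name in sparse_frame' / 'sparse_frame[slot_name]'
      | some v => slots ++ [v]
      | none => slots ++ [UNKNOWN_SLOTVAL]) []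

-- ===== PORT B =====
-- index = {name: i for i, name in enumerate(SLOTNAMES_ORDERED)}; pre-fill; scatter; mask query last
def dense_frame_from_alt (sparse_frame : List (String × String)) (query_slotname : String) : List String :=
  -- query_slotname is used below via the index lookup
  let index : List (String × Nat) := SLOTNAMES_ORDERED.zipIdx
  let slots0 : List String := List.replicate SLOTNAMES_ORDERED.length UNKNOWN_SLOTVAL
  let slots := sparse_frame.foldl (fun L p =>
    match List.lookup p.1 index with
    | some i => L.set i p.2
    | none => L) slots0
  match List.lookup query_slotname index with
  | some qi => slots.set qi QUES_SLOTVAL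
  | none => slots

-- ===== PRECONDITION & SPEC =====
-- Pre_ excludes association lists with duplicate slot names: they encode no Python dict
-- (A's parameter is a dict, which cannot hold duplicate keys), so the encoding is ambiguous there.
def Pre_dense_frame_from (sparse_frame : List (String × String)) (query_slotname : String) : Prop :=
  (sparse_frame.map Prod.fst).Nodup

instance (sparse_frame : List (String × String)) (query_slotname : String) : Decidable (Pre_dense_frame_from sparse_frame query_slotname) := by unfold Pre_dense_frame_from; infer_instance

def pvWitness_dense_frame_from : (List (String × String)) × String :=
  ([("event", "plant absorb water"), ("participant", "water")], "participant")

def Spec_dense_frame_from (sparse_frame : List (String × String)) (query_slotname : String) (out : List String) : Prop := out = dense_frame_from_alt sparse_frame query_slotname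
instance (sparse_frame : List (String × String)) (query_slotname : String) (out : List String) : Decidable (Spec_dense_frame_from sparse_frame query_slotname out) := by unfold Spec_dense_frame_from; infer_instance

-- ===== CLAIM (what is proved, stated in full; the proofs are below) =====
def Claim_equal_dense_frame_from : Prop := ∀ (sparse_frame : List (String × String)) (query_slotname : String), Dom_dense_frame_from sparse_frame query_slotname → Pre_dense_frame_from sparse_frame query_slotname → Spec_dense_frame_from sparse_frame query_slotname (dense_frame_from sparse_frame query_slotname)

-- ===== LEMMAS AND PROOFS =====

-- per-slot value A appends for a slot name
def pvF (sparse_frame : List (String × String)) (query_slotname : String) (n : String) : String :=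
  if n == query_slotname then QUES_SLOTVAL
  else match List.lookup n sparse_frame with
    | some v => v
    | none => UNKNOWN_SLOTVAL

lemma A_eq_map (sp : List (String × String)) (q : String) :
    dense_frame_from sp q = SLOTNAMES_ORDERED.map (pvF sp q) := by
  unfold dense_frame_from
  have h : (fun (slots : List String) slot_name =>
      if slot_name == q then slots ++ [QUES_SLOTVAL]
      else match List.lookup slot_name sp with
        | some v => slots ++ [v]
        | none => slots ++ [UNKNOWN_SLOTVAL])
      = fun (slots : List String) n => slots ++ [pvF sp q n] := by
    funext slots n
    unfold pvF
    by_cases hq : n == q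
    · simp [hq]
    · simp only [hq]
      cases List.lookup n sp <;> rfl
  rw [h, PySem.List.foldl_append_singleton_eq_map]
  simp

lemma slotnames_nodup : SLOTNAMES_ORDERED.Nodup := by decide

lemma lookup_zipIdx_mem : ∀ (l : List String) (k : Nat) (n : String) (i : Nat),
    List.lookup n (l.zipIdx k) = some i → k ≤ i ∧ i - k < l.length ∧ l.getD (i - k) "" = n := by
  intro l
  induction l with
  | nil => intro k n i h; simp [List.zipIdx] at h
  | cons a tl ih =>
    intro k n i h
    simp only [List.zipIdx_cons, List.lookup_cons] at h
    by_cases hn : n == a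
    · simp [hn] at h
      subst h
      refine ⟨le_refl _, ?_, ?_⟩ <;> simp [List.getD]
      exact (eq_of_beq hn).symm
    · simp [hn] at h
      obtain ⟨h1, h2, h3⟩ := ih (k + 1) n i h
      refine ⟨by omega, by simp; omega, ?_⟩
      have : i - k = (i - (k + 1)) + 1 := by omega
      rw [this]
      simpa using h3

lemma lookup_zipIdx_self : ∀ (l : List String) (k j : Nat), j < l.length → l.Nodup →
    List.lookup (l.getD j "") (l.zipIdx k) = some (k + j) := by
  intro l
  induction l with
  | nil => intro k j h; simp at h
  | cons a tl ih =>
    intro k j hj hnd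
    cases j with
    | zero => simp [List.zipIdx_cons, List.getD]
    | succ j =>
      have hjl : j < tl.length := by simpa using hj
      have hmem : tl.getD j "" ∈ tl := by
        rw [List.getD_eq_getElem tl "" hjl]; exact List.getElem_mem hjl
      have hne : ¬ (tl.getD j "" == a) := by
        simp only [beq_iff_eq]
        intro hEq
        exact (List.nodup_cons.mp hnd).1 (hEq ▸ hmem)
      simp only [List.getD_cons_succ, List.zipIdx_cons, List.lookup_cons, hne]
      rw [ih (k + 1) j hjl (List.nodup_cons.mp hnd).2]
      congr 1
      omega

-- facts specialised to the concrete index map (k = 0)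
lemma lookup_index_mem {n : String} {i : Nat} (h : List.lookup n SLOTNAMES_ORDERED.zipIdx = some i) :
    i < SLOTNAMES_ORDERED.length ∧ SLOTNAMES_ORDERED.getD i "" = n := by
  obtain ⟨_, h2, h3⟩ := lookup_zipIdx_mem SLOTNAMES_ORDERED 0 n i h
  simpa using ⟨h2, h3⟩

lemma lookup_index_self {j : Nat} (hj : j < SLOTNAMES_ORDERED.length) :
    List.lookup (SLOTNAMES_ORDERED.getD j "") SLOTNAMES_ORDERED.zipIdx = some j := by
  simpa using lookup_zipIdx_self SLOTNAMES_ORDERED 0 j hj slotnames_nodup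

lemma scatter_length : ∀ (sp : List (String × String)) (L : List String),
    (sp.foldl (fun L p =>
      match List.lookup p.1 SLOTNAMES_ORDERED.zipIdx with
      | some i => L.set i p.2
      | none => L) L).length = L.length := by
  intro sp
  induction sp with
  | nil => intro L; rfl
  | cons p tl ih =>
    intro L
    simp only [List.foldl_cons]
    cases List.lookup p.1 SLOTNAMES_ORDERED.zipIdx with
    | none => exact ih L
    | some i => rw [ih (L.set i p.2)]; exact List.length_set ..

lemma scatter_getElem? : ∀ (sp : List (String × String)) (L : List String) (j : Nat),
    j < SLOTNAMES_ORDERED.length → L.length = SLOTNAMES_ORDERED.length →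
    (sp.map Prod.fst).Nodup →
    (sp.foldl (fun L p =>
      match List.lookup p.1 SLOTNAMES_ORDERED.zipIdx with
      | some i => L.set i p.2
      | none => L) L)[j]? =
    (match List.lookup (SLOTNAMES_ORDERED.getD j "") sp with
      | some v => some v
      | none => L[j]?) := by
  intro sp
  induction sp with
  | nil => intro L j _ _ _; simp
  | cons p tl ih =>
    intro L j hj hL hnd
    obtain ⟨n, v⟩ := p
    simp only [List.map_cons, List.nodup_cons] at hnd
    simp only [List.foldl_cons, List.lookup_cons]
    by_cases hn : SLOTNAMES_ORDERED.getD j "" == n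
    · -- this item writes position j; no later item has this key
      have hEq : n = SLOTNAMES_ORDERED.getD j "" := (eq_of_beq hn).symm
      have hidx : List.lookup n SLOTNAMES_ORDERED.zipIdx = some j := hEq ▸ lookup_index_self hj
      have hnone : List.lookup (SLOTNAMES_ORDERED.getD j "") tl = none := by
        rw [List.lookup_eq_none_iff]
        intro p hp
        simp only [bne_iff_ne, ne_eq]
        intro hEq2
        exact hnd.1 (by rw [hEq, hEq2]; exact List.mem_map_of_mem hp)
      simp only [hidx, hn]
      rw [ih (L.set j v) j hj (by rw [List.length_set]; exact hL) hnd.2, hnone]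
      have hset : (L.set j v)[j]? = some v := List.getElem?_set_self (by omega)
      simpa using hset
    · -- this item writes elsewhere (or nowhere)
      simp only [hn]
      cases hidx : List.lookup n SLOTNAMES_ORDERED.zipIdx with
      | none => exact ih L j hj hL hnd.2
      | some i =>
        have hne : i ≠ j := by
          intro hEq
          subst hEq
          exact hn (beq_iff_eq.mpr (lookup_index_mem hidx).2)
        rw [ih (L.set i v) j hj (by rw [List.length_set]; exact hL) hnd.2]
        rw [List.getElem?_set_ne hne]

lemma replicate_getElem? {j : Nat} (hj : j < SLOTNAMES_ORDERED.length) :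
    (List.replicate SLOTNAMES_ORDERED.length UNKNOWN_SLOTVAL)[j]? = some UNKNOWN_SLOTVAL :=
  List.getElem?_replicate_of_lt hj

-- ===== VERDICT (by name: the statement is the Claim_ definition above) =====
theorem dense_frame_from_spec : Claim_equal_dense_frame_from := by
  intro sp q _ hpre
  unfold Spec_dense_frame_from
  rw [A_eq_map]
  have hB : dense_frame_from_alt sp q =
      (match List.lookup q SLOTNAMES_ORDERED.zipIdx with
       | some qi => (sp.foldl (fun L p =>
            match List.lookup p.1 SLOTNAMES_ORDERED.zipIdx with
            | some i => L.set i p.2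
            | none => L) (List.replicate SLOTNAMES_ORDERED.length UNKNOWN_SLOTVAL)).set qi QUES_SLOTVAL
       | none => sp.foldl (fun L p =>
            match List.lookup p.1 SLOTNAMES_ORDERED.zipIdx with
            | some i => L.set i p.2
            | none => L) (List.replicate SLOTNAMES_ORDERED.length UNKNOWN_SLOTVAL)) := rfl
  rw [hB]
  set scat := sp.foldl (fun L p =>
      match List.lookup p.1 SLOTNAMES_ORDERED.zipIdx with
      | some i => L.set i p.2
      | none => L) (List.replicate SLOTNAMES_ORDERED.length UNKNOWN_SLOTVAL) with hscat
  have hlen : scat.length = SLOTNAMES_ORDERED.length := by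
    rw [hscat, scatter_length, List.length_replicate]
  have hscatj : ∀ j, j < SLOTNAMES_ORDERED.length →
      scat[j]? = (match List.lookup (SLOTNAMES_ORDERED.getD j "") sp with
        | some v => some v
        | none => some UNKNOWN_SLOTVAL) := by
    intro j hj
    rw [hscat, scatter_getElem? sp _ j hj (List.length_replicate ..) hpre]
    cases List.lookup (SLOTNAMES_ORDERED.getD j "") sp with
    | some v => rfl
    | none => simp [replicate_getElem? hj]
  apply List.ext_getElem?
  intro j
  by_cases hj : j < SLOTNAMES_ORDERED.length
  · -- in-range positions
    have hmapj : (SLOTNAMES_ORDERED.map (pvF sp q))[j]? = some (pvF sp q (SLOTNAMES_ORDERED.getD j "")) := by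
      simp [List.getElem?_map, List.getD, List.getElem?_eq_getElem hj]
    cases hq : List.lookup q SLOTNAMES_ORDERED.zipIdx with
    | some qi =>
      obtain ⟨hqi, hqname⟩ := lookup_index_mem hq
      by_cases hij : qi = j
      · subst hij
        rw [hmapj, List.getElem?_set_self (by omega)]
        have hq3 : SLOTNAMES_ORDERED[qi] = q := by
          rw [← List.getD_eq_getElem SLOTNAMES_ORDERED "" hqi]; exact hqname
        simp [pvF, List.getD, List.getElem?_eq_getElem hqi, hq3]
      · rw [hmapj, List.getElem?_set_ne hij, hscatj j hj]
        have hne : ¬ (SLOTNAMES_ORDERED.getD j "" == q) := by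
          simp only [beq_iff_eq]
          intro hEq
          have := lookup_index_self hj
          rw [hEq, hq] at this
          exact hij (Option.some.inj this)
        simp only [pvF, hne]
        cases List.lookup (SLOTNAMES_ORDERED.getD j "") sp <;> rfl
    | none =>
      rw [hmapj, hscatj j hj]
      have hne : ¬ (SLOTNAMES_ORDERED.getD j "" == q) := by
        simp only [beq_iff_eq]
        intro hEq
        have := lookup_index_self hj
        rw [hEq, hq] at this
        simp at this
      simp only [pvF, hne]
      cases List.lookup (SLOTNAMES_ORDERED.getD j "") sp <;> rfl
  · -- out of range on both sides
    have h1 : (SLOTNAMES_ORDERED.map (pvF sp q))[j]? = none := by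
      rw [List.getElem?_eq_none]; simp; omega
    cases hq : List.lookup q SLOTNAMES_ORDERED.zipIdx with
    | some qi =>
      rw [h1]
      symm
      apply List.getElem?_eq_none
      show (scat.set qi QUES_SLOTVAL).length ≤ j
      rw [List.length_set]
      omega
    | none =>
      rw [h1]
      symm
      apply List.getElem?_eq_none
      show scat.length ≤ j
      omega
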